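-- pv_equiv track=rewrite | github.com/JasonBalayev/Codeforces-Solutions | 2098B - Sasha And The Apartment Purchase/2098B.py | count_houses
-- ===== SOURCE A (Python) =====
-- def count_houses(a,k):
--     a.sort()
--     n=len(a)
--     ranges=[]
--     for i in range(n):
--         if n-(2*min(i,n-1-i)+1)<=k:
--             v=a[i]
--             ranges.append((v,v))
--     for i in range(n-1):
--         if n-(2*min(i+1,n-1-i))<=k:
--             ranges.append((a[i],a[i+1]))
--     if not ranges:
--         return 0
--     ranges.sort()
--     res=0
--     l,r=ranges[0]
--     for x,y in ranges[1:]: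
--         if x>r:
--             res+=r-l+1
--             l,r=x,y
--         else:
--             r=max(r,y)
--     res+=r-l+1
--     return res
-- ===== SOURCE B (Python) =====
-- def count_houses(a, k):
--     a.sort()
--     n = len(a)
--     s = n - k
--     d = max(0, -(-(s - 1) // 2))   # smallest m >= 0 with 2*m + 1 >= s
--     c = max(1, -(-s // 2))         # smallest m >= 1 with 2*m >= s
--     lo = hi = None
--     if 2 * d <= n - 1:             # point band a[d] .. a[n-1-d] nonempty
--         lo, hi = d, n - 1 - d
--     if 2 * c <= n:                 # interval band a[c-1] .. a[n-c] nonempty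
--         if lo is None:
--             lo, hi = c - 1, n - c
--         else:
--             lo, hi = min(lo, c - 1), max(hi, n - c)
--     if lo is None:
--         return 0
--     return a[hi] - a[lo] + 1
-- ===== Notes on version B (the rewrite author's own statement) =====
-- stated objective: faster
-- what changed: B replaces A's collect-candidate-ranges / second sort / interval-merge pipeline by a closed-form band computation: the valid point and interval indices each form one contiguous middle band whose boundaries are ceiling divisions of n-k, so after sorting B just reads a[lo] and a[hi] at computed indices, with no range list, no second sort and no merge pass.
import Mathlib
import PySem

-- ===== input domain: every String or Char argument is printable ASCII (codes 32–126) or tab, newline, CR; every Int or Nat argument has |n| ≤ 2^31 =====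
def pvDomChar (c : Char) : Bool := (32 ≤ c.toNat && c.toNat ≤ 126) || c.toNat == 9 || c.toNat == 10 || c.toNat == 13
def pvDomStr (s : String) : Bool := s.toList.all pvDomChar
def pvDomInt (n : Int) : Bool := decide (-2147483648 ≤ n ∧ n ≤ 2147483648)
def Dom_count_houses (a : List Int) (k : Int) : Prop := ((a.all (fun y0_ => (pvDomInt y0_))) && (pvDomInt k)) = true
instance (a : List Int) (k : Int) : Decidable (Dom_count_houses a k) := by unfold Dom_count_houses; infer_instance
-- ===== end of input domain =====

-- B replaces A's collect-ranges / sort / merge pipeline by a closed-form band computation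
-- (objective: simpler).  Both Pythons sort `a` in place; the equivalence proved here is about
-- the return value only (B performs the same mutation).

-- ===== PORT A =====
-- A's merge-loop body ('if x > r: flush segment else extend r'), named for readability
def mergeStep (st : Int × Int × Int) (p : Int × Int) : Int × Int × Int :=
  if p.1 > st.2.2 then (st.1 + (st.2.2 - st.2.1 + 1), p.1, p.2)
  else (st.1, st.2.1, max st.2.2 p.2)

def count_houses (a : List Int) (k : Int) : Int :=
  let s := PySem.List.sorted a (fun x => x) false
  let n : Int := PySem.List.len s
  let ranges : List (Int × Int) :=
    (PySem.List.pyRange 0 n 1).foldl (fun acc i =>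
      if n - (2 * min i (n - 1 - i) + 1) ≤ k then
        acc ++ [(PySem.List.pyGetD s i 0, PySem.List.pyGetD s i 0)]
      else acc) []
  let ranges :=
    (PySem.List.pyRange 0 (n - 1) 1).foldl (fun acc i =>
      if n - 2 * min (i + 1) (n - 1 - i) ≤ k then
        acc ++ [(PySem.List.pyGetD s i 0, PySem.List.pyGetD s (i + 1) 0)]
      else acc) ranges
  if ranges = [] then 0
  else
    match PySem.List.sorted2 ranges Prod.fst Prod.snd false with
    | [] => 0
    | (l0, r0) :: rest =>
      let st := rest.foldl mergeStep ((0 : Int), l0, r0)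
      st.1 + (st.2.2 - st.2.1 + 1)

-- ===== PORT B =====
-- B: the valid point indices form the band [d, n-1-d] and the valid interval indices the band
-- [c-1, n-1-c], so the answer is read off the sorted list at the combined band's endpoints.
def count_houses_alt (a : List Int) (k : Int) : Int :=
  let s := PySem.List.sorted a (fun x => x) false
  let n : Int := PySem.List.len s
  let sv := n - k
  let d := max 0 (-(PySem.Int.floordiv (-(sv - 1)) 2))
  let c := max 1 (-(PySem.Int.floordiv (-sv) 2))
  let lohi : Option (Int × Int) :=
    if 2 * d ≤ n - 1 then some (d, n - 1 - d) else none
  let lohi2 : Option (Int × Int) :=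
    if 2 * c ≤ n then
      match lohi with
      | none => some (c - 1, n - c)
      | some (lo, hi) => some (min lo (c - 1), max hi (n - c))
    else lohi
  match lohi2 with
  | none => 0
  | some (lo, hi) => PySem.List.pyGetD s hi 0 - PySem.List.pyGetD s lo 0 + 1

-- ===== PRECONDITION & SPEC =====
def Spec_count_houses (a : List Int) (k : Int) (out : Int) : Prop := out = count_houses_alt a k
instance (a : List Int) (k : Int) (out : Int) : Decidable (Spec_count_houses a k out) := by unfold Spec_count_houses; infer_instance

-- ===== CLAIM (what is proved, stated in full; the proofs are below) =====
def Claim_equal_count_houses : Prop := ∀ (a : List Int) (k : Int), Dom_count_houses a k → Spec_count_houses a k (count_houses a k)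

-- ===== LEMMAS AND PROOFS =====

-- the two index conditions of program A
def Pc (n k i : Int) : Prop := n - (2 * min i (n - 1 - i) + 1) ≤ k
def Qc (n k i : Int) : Prop := n - 2 * min (i + 1) (n - 1 - i) ≤ k
-- index i contributes some candidate range
def Vd (n k i : Int) : Prop := (0 ≤ i ∧ i < n ∧ Pc n k i) ∨ (0 ≤ i ∧ i < n - 1 ∧ Qc n k i)

-- ceiling division by two: -((-t) // 2) in Python
lemma ceil2 (t : Int) :
    t ≤ 2 * (-(PySem.Int.floordiv (-t) 2)) ∧ 2 * (-(PySem.Int.floordiv (-t) 2)) ≤ t + 1 := by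
  have h := (PySem.Int.neg_floordiv_neg_eq_iff_of_pos (a := t) (b := 2)
      (q := -(PySem.Int.floordiv (-t) 2)) (by omega)).mp rfl
  omega

-- contributing indices form one contiguous band
lemma Vd_between {n k i j t : Int} (hi : Vd n k i) (hj : Vd n k j)
    (h1 : i ≤ t) (h2 : t ≤ j) : Vd n k t := by
  unfold Vd Pc Qc at *; omega

-- two adjacent contributing indices always have a valid interval between them
lemma Qc_of_adj {n k i : Int} (h1 : Vd n k (i - 1)) (h2 : Vd n k i) :
    0 ≤ i - 1 ∧ i - 1 < n - 1 ∧ Qc n k (i - 1) := by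
  unfold Vd Pc Qc at *; omega

-- shorthand for in-range element access of the sorted list
def gEl (s : List Int) (i : Int) : Int := PySem.List.pyGetD s i 0

-- the canonical description of the candidate multiset A builds
def IsRange (s : List Int) (k : Int) (p : Int × Int) : Prop :=
  (∃ i : Int, 0 ≤ i ∧ i < PySem.List.len s ∧ Pc (PySem.List.len s) k i ∧ p = (gEl s i, gEl s i)) ∨
  (∃ i : Int, 0 ≤ i ∧ i < PySem.List.len s - 1 ∧ Qc (PySem.List.len s) k i ∧ p = (gEl s i, gEl s (i + 1)))

lemma mono_g {s : List Int} (hs : s.Pairwise (· ≤ ·)) {i j : Int}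
    (h0 : 0 ≤ i) (hij : i ≤ j) (hj : j < PySem.List.len s) :
    gEl s i ≤ gEl s j := by
  have hlen : PySem.List.len s = (s.length : Int) := PySem.List.len_eq s
  unfold gEl
  rw [PySem.List.pyGetD_of_nonneg s 0 h0, PySem.List.pyGetD_of_nonneg s 0 (by omega)]
  have hj' : j.toNat < s.length := by omega
  have hi' : i.toNat < s.length := by omega
  rw [List.getD_eq_getElem s 0 hi', List.getD_eq_getElem s 0 hj']
  rcases Nat.lt_or_ge i.toNat j.toNat with hlt | hge
  · exact (List.pairwise_iff_getElem.mp hs) _ _ hi' hj' hlt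
  · have heq : i.toNat = j.toNat := by omega
    simp [heq]

lemma lt_of_g_lt {s : List Int} (hs : s.Pairwise (· ≤ ·)) {u v : Int}
    (hv : 0 ≤ v) (hu : u < PySem.List.len s) (h : gEl s u < gEl s v) : u < v := by
  by_contra hc
  push_neg at hc
  exact absurd (mono_g hs hv hc hu) (by omega)

lemma IsRange_x_le_y {s : List Int} (hs : s.Pairwise (· ≤ ·)) {k : Int} {p : Int × Int}
    (h : IsRange s k p) : p.1 ≤ p.2 := by
  rcases h with ⟨i, h0, h1, _, rfl⟩ | ⟨i, h0, h1, _, rfl⟩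
  · exact le_refl _
  · exact mono_g hs h0 (by omega) (by omega)

lemma IsRange_Vd {s : List Int} {k : Int} {p : Int × Int} (h : IsRange s k p) :
    ∃ i : Int, Vd (PySem.List.len s) k i ∧ 0 ≤ i ∧ i < PySem.List.len s ∧ p.1 = gEl s i := by
  rcases h with ⟨i, h0, h1, hp, rfl⟩ | ⟨i, h0, h1, hq, rfl⟩
  · exact ⟨i, Or.inl ⟨h0, h1, hp⟩, h0, h1, rfl⟩
  · exact ⟨i, Or.inr ⟨h0, h1, hq⟩, h0, by omega, rfl⟩

-- walking left from i to the first strictly smaller value yields a valid interval ending at g i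
lemma witness_aux {s : List Int} (hs : s.Pairwise (· ≤ ·)) {k : Int} :
    ∀ (t : Nat) (i0 i : Int), i.toNat ≤ t → 0 ≤ i0 → i0 < i →
    Vd (PySem.List.len s) k i0 → Vd (PySem.List.len s) k i → i < PySem.List.len s →
    gEl s i0 < gEl s i →
    ∃ j : Int, 0 ≤ j ∧ j < PySem.List.len s - 1 ∧ Qc (PySem.List.len s) k j ∧
      gEl s j < gEl s i ∧ gEl s (j + 1) = gEl s i := by
  intro t
  induction t with
  | zero => intro i0 i ht h00 hlt _ _ _ _; omega
  | succ t ih =>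
    intro i0 i ht h00 hlt hv0 hvi hilen hg
    have hv1 : Vd (PySem.List.len s) k (i - 1) := Vd_between hv0 hvi (by omega) (by omega)
    have hle : gEl s (i - 1) ≤ gEl s i := mono_g hs (by omega) (by omega) hilen
    rcases lt_or_eq_of_le hle with hcase | hcase
    · obtain ⟨hb1, hb2, hq⟩ := Qc_of_adj hv1 hvi
      refine ⟨i - 1, hb1, hb2, hq, hcase, ?_⟩
      have hplus : i - 1 + 1 = i := by ring
      rw [hplus]
    · have h0' : i0 < i - 1 := by
        rcases lt_or_eq_of_le (show i0 ≤ i - 1 by omega) with h | h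
        · exact h
        · rw [h, hcase] at hg; omega
      obtain ⟨j, a1, a2, a3, a4, a5⟩ :=
        ih i0 (i - 1) (by omega) h00 h0' hv0 hv1 (by omega) (by rw [hcase]; exact hg)
      refine ⟨j, a1, a2, a3, by rw [← hcase]; exact a4, by rw [← hcase]; exact a5⟩

-- every candidate is either leftmost or reachable from a candidate interval ending at its x
lemma cond_ranges {s : List Int} (hs : s.Pairwise (· ≤ ·)) {k : Int} :
    ∀ q, IsRange s k q →
      (∀ p, IsRange s k p → q.1 ≤ p.1) ∨
      (∃ w, IsRange s k w ∧ w.1 < q.1 ∧ q.1 ≤ w.2 ∧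
        ∀ p, IsRange s k p → ¬(w.1 < p.1 ∧ p.1 < q.1)) := by
  intro q hq
  by_cases hall : ∀ p, IsRange s k p → q.1 ≤ p.1
  · exact Or.inl hall
  · right
    push_neg at hall
    obtain ⟨p0, hp0, hp0lt⟩ := hall
    obtain ⟨iq, hviq, hiq0, hiqlen, hqx⟩ := IsRange_Vd hq
    obtain ⟨i0, hvi0, hi00, hi0len, hp0x⟩ := IsRange_Vd hp0
    have hgl : gEl s i0 < gEl s iq := by rw [← hp0x, ← hqx]; exact hp0lt
    have hlt : i0 < iq := lt_of_g_lt hs hiq0 hi0len hgl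
    obtain ⟨j, hj0, hjlen, hjq, hjlt, hjeq⟩ :=
      witness_aux hs iq.toNat i0 iq (le_refl _) hi00 hlt hvi0 hviq hiqlen hgl
    refine ⟨(gEl s j, gEl s (j + 1)), Or.inr ⟨j, hj0, hjlen, hjq, rfl⟩, ?_, ?_, ?_⟩
    · rw [hqx]; exact hjlt
    · rw [hqx]
      dsimp only
      rw [hjeq]
    · rintro p hp ⟨hb1, hb2⟩
      obtain ⟨ip, hvip, hip0, hiplen, hpx⟩ := IsRange_Vd hp
      dsimp only at hb1 hb2
      rw [hpx] at hb1 hb2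
      rw [hqx] at hb2
      have h1 : j < ip := lt_of_g_lt hs hip0 (by omega) hb1
      have h2 : gEl s (j + 1) ≤ gEl s ip := mono_g hs (by omega) (by omega) hiplen
      rw [hjeq] at h2
      omega

-- Python's lexicographic tuple sort is PySem.List.sorted with the Prod.Lex key
lemma sorted2_eq_sorted_lex (xs : List (Int × Int)) :
    PySem.List.sorted2 xs Prod.fst Prod.snd false
      = PySem.List.sorted xs (fun p => (toLex p : Lex (Int × Int))) false := by
  have h2 : PySem.List.sorted2 xs Prod.fst Prod.snd false
      = xs.foldl (fun acc x => PySem.List.insertBy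
          (fun a b => decide (a.1 < b.1) || (!decide (b.1 < a.1) && decide (a.2 < b.2))) x acc) [] := rfl
  have hfun : (fun (a b : Int × Int) => decide (a.1 < b.1) || (!decide (b.1 < a.1) && decide (a.2 < b.2)))
      = fun a b => decide ((toLex a : Lex (Int × Int)) < toLex b) := by
    funext a b
    rw [Bool.eq_iff_iff]
    simp only [Bool.or_eq_true, Bool.and_eq_true, Bool.not_eq_true', decide_eq_true_eq,
      decide_eq_false_iff_not, Prod.Lex.lt_iff, ofLex_toLex]
    omega
  rw [h2, hfun, ← PySem.List.sorted_eq_foldl_insertBy]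

lemma lexle_dest {p q : Int × Int} (h : (toLex p : Lex (Int × Int)) ≤ toLex q) :
    p.1 < q.1 ∨ (p.1 = q.1 ∧ p.2 ≤ q.2) := by
  rcases Prod.Lex.le_iff.mp h with h | h
  · exact Or.inl h
  · exact Or.inr h

-- adjacency in the sorted candidate list: the next x never jumps past the previous y
lemma adj_of_cond (L : List (Int × Int))
    (hpw : L.Pairwise (fun p q => (toLex p : Lex (Int × Int)) ≤ toLex q))
    (hxy : ∀ p ∈ L, p.1 ≤ p.2)
    (hcond : ∀ q ∈ L, (∀ p ∈ L, q.1 ≤ p.1) ∨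
      (∃ w ∈ L, w.1 < q.1 ∧ q.1 ≤ w.2 ∧ ∀ p ∈ L, ¬(w.1 < p.1 ∧ p.1 < q.1))) :
    ∀ j (h : j + 1 < L.length), L[j + 1].1 ≤ L[j].2 := by
  intro j hj
  have hjlen : j < L.length := by omega
  rcases hcond L[j + 1] (List.getElem_mem hj) with hall | ⟨w, hw, hw1, hw2, hnb⟩
  · exact le_trans (hall L[j] (List.getElem_mem hjlen)) (hxy L[j] (List.getElem_mem hjlen))
  · obtain ⟨jw, hjwlt, hwe⟩ := List.mem_iff_getElem.mp hw
    have hpwf := List.pairwise_iff_getElem.mp hpw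
    have hjwle : jw ≤ j := by
      by_contra hc
      push_neg at hc
      rcases Nat.eq_or_lt_of_le hc with heq | hlt2
      · subst heq
        simp only [Nat.succ_eq_add_one] at hwe
        rw [hwe] at hw1
        omega
      · have h0 := hpwf (j + 1) jw hj hjwlt hlt2
        rw [hwe] at h0
        have hle := lexle_dest h0
        omega
    rcases Nat.eq_or_lt_of_le hjwle with heq | hlt
    · have hwj : L[j].2 = w.2 := by subst heq; rw [hwe]
      rw [hwj]; exact hw2
    · have h0 := hpwf jw j hjwlt hjlen hlt
      rw [hwe] at h0
      have h1 := lexle_dest h0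
      have h2 := lexle_dest (hpwf j (j + 1) hjlen hj (Nat.lt_succ_self j))
      have h3 := hxy L[j] (List.getElem_mem hjlen)
      have h4 := hnb L[j] (List.getElem_mem hjlen)
      omega

-- a chained list of ranges, each starting no later than the previous one ends
def Chained : List (Int × Int) → Prop
  | [] => True
  | [_] => True
  | p :: q :: t => q.1 ≤ p.2 ∧ Chained (q :: t)

lemma chained_of_adj :
    ∀ (L : List (Int × Int)), (∀ j (h : j + 1 < L.length), L[j + 1].1 ≤ L[j].2) → Chained L := by
  intro L
  induction L with
  | nil => intro _; trivial
  | cons a t ih =>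
    intro h
    rcases t with _ | ⟨b, t'⟩
    · trivial
    · exact ⟨h 0 (by simp), ih (fun j hj => by
        have := h (j + 1) (by simpa using Nat.succ_lt_succ hj)
        simpa using this)⟩

-- A's merge loop never flushes on a chained list: it just accumulates the running max
lemma merge_run : ∀ (rest : List (Int × Int)) (res l r : Int),
    (∀ p ∈ rest.head?, p.1 ≤ r) → Chained rest →
    rest.foldl mergeStep (res, l, r)
      = (res, l, rest.foldl (fun acc p => max acc p.2) r) := by
  intro rest
  induction rest with
  | nil => intro res l r _ _; rfl
  | cons p t ih =>
    intro res l r hhd hch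
    have hp : p.1 ≤ r := hhd p (by simp)
    have hstep : mergeStep (res, l, r) p = (res, l, max r p.2) := by
      unfold mergeStep; rw [if_neg (by dsimp only; omega)]
    rw [List.foldl_cons, hstep, List.foldl_cons]
    refine ih res l (max r p.2) ?_ ?_
    · intro q hq
      rcases t with _ | ⟨q', t'⟩
      · simp at hq
      · simp only [List.head?_cons, Option.mem_def, Option.some.injEq] at hq
        subst hq
        have := hch.1
        omega
    · rcases t with _ | ⟨q', t'⟩
      · trivial
      · exact hch.2

-- the candidate list A builds, in closed filter/map form
def RngList (s : List Int) (k : Int) : List (Int × Int) :=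
  ((PySem.List.pyRange 0 (PySem.List.len s) 1).filter
      (fun i => decide (PySem.List.len s - (2 * min i (PySem.List.len s - 1 - i) + 1) ≤ k))).map
      (fun i => (PySem.List.pyGetD s i 0, PySem.List.pyGetD s i 0)) ++
  ((PySem.List.pyRange 0 (PySem.List.len s - 1) 1).filter
      (fun i => decide (PySem.List.len s - 2 * min (i + 1) (PySem.List.len s - 1 - i) ≤ k))).map
      (fun i => (PySem.List.pyGetD s i 0, PySem.List.pyGetD s (i + 1) 0))

lemma rangesA_spec (s : List Int) (k : Int) :
    (PySem.List.pyRange 0 (PySem.List.len s - 1) 1).foldl (fun acc i =>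
      if PySem.List.len s - 2 * min (i + 1) (PySem.List.len s - 1 - i) ≤ k then
        acc ++ [(PySem.List.pyGetD s i 0, PySem.List.pyGetD s (i + 1) 0)]
      else acc)
      ((PySem.List.pyRange 0 (PySem.List.len s) 1).foldl (fun acc i =>
        if PySem.List.len s - (2 * min i (PySem.List.len s - 1 - i) + 1) ≤ k then
          acc ++ [(PySem.List.pyGetD s i 0, PySem.List.pyGetD s i 0)]
        else acc) [])
    = RngList s k := by
  rw [PySem.List.foldl_append_ite, PySem.List.foldl_append_ite]
  simp only [List.nil_append]
  rfl

lemma mem_RngList_iff (s : List Int) (k : Int) (p : Int × Int) :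
    p ∈ RngList s k ↔ IsRange s k p := by
  unfold RngList IsRange Pc Qc gEl
  simp only [List.mem_append, List.mem_map, List.mem_filter, decide_eq_true_eq,
    PySem.List.mem_pyRange_one]
  constructor
  · rintro (⟨i, ⟨⟨h0, h1⟩, h2⟩, h3⟩ | ⟨i, ⟨⟨h0, h1⟩, h2⟩, h3⟩)
    · exact Or.inl ⟨i, h0, h1, h2, h3.symm⟩
    · exact Or.inr ⟨i, h0, h1, h2, h3.symm⟩
  · rintro (⟨i, h0, h1, h2, h3⟩ | ⟨i, h0, h1, h2, h3⟩)
    · exact Or.inl ⟨i, ⟨⟨h0, h1⟩, h2⟩, h3.symm⟩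
    · exact Or.inr ⟨i, ⟨⟨h0, h1⟩, h2⟩, h3.symm⟩

-- A's collect/sort/merge pipeline returns maxY - minX + 1 over the candidate set
lemma A_core (s : List Int) (k : Int) (hs : s.Pairwise (· ≤ ·)) (hRne : RngList s k ≠ []) :
    ∃ l0 F : Int,
      (∀ p, IsRange s k p → l0 ≤ p.1 ∧ p.2 ≤ F) ∧
      (∃ p, IsRange s k p ∧ p.1 = l0) ∧ (∃ p, IsRange s k p ∧ p.2 = F) ∧
      (match PySem.List.sorted2 (RngList s k) Prod.fst Prod.snd false with
       | [] => (0 : Int)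
       | (x0, y0) :: rest =>
         let st := rest.foldl mergeStep ((0 : Int), x0, y0)
         st.1 + (st.2.2 - st.2.1 + 1)) = F - l0 + 1 := by
  rw [sorted2_eq_sorted_lex]
  have hpw := PySem.List.sorted_pairwise (RngList s k) (fun p : Int × Int => (toLex p : Lex (Int × Int)))
  have hperm := PySem.List.sorted_perm (RngList s k) (fun p : Int × Int => (toLex p : Lex (Int × Int))) false
  rcases hrs : PySem.List.sorted (RngList s k) (fun p : Int × Int => (toLex p : Lex (Int × Int))) false
    with _ | ⟨⟨l0, r0⟩, rest⟩
  · rw [hrs] at hperm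
    exact absurd (List.perm_nil.mp hperm.symm) hRne
  · rw [hrs] at hpw hperm
    have hmemA : ∀ p : Int × Int, p ∈ (l0, r0) :: rest ↔ IsRange s k p := fun p =>
      (hperm.mem_iff).trans (mem_RngList_iff s k p)
    have hxy : ∀ p ∈ (l0, r0) :: rest, p.1 ≤ p.2 := fun p hp' =>
      IsRange_x_le_y hs ((hmemA p).mp hp')
    have hcond : ∀ q ∈ (l0, r0) :: rest, (∀ p ∈ (l0, r0) :: rest, q.1 ≤ p.1) ∨
        (∃ w ∈ (l0, r0) :: rest, w.1 < q.1 ∧ q.1 ≤ w.2 ∧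
          ∀ p ∈ (l0, r0) :: rest, ¬(w.1 < p.1 ∧ p.1 < q.1)) := by
      intro q hq'
      rcases cond_ranges hs q ((hmemA q).mp hq') with h | ⟨w, hw, h1, h2, h3⟩
      · exact Or.inl (fun p hp' => h p ((hmemA p).mp hp'))
      · exact Or.inr ⟨w, (hmemA w).mpr hw, h1, h2, fun p hp' => h3 p ((hmemA p).mp hp')⟩
    have hch := chained_of_adj _ (adj_of_cond _ hpw hxy hcond)
    have hhead : ∀ p ∈ rest.head?, p.1 ≤ r0 := by
      rcases rest with _ | ⟨q', t⟩
      · simp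
      · intro p hp'
        simp only [List.head?_cons, Option.mem_def, Option.some.injEq] at hp'
        subst hp'
        exact hch.1
    have hchrest : Chained rest := by
      rcases rest with _ | ⟨q', t⟩
      · trivial
      · exact hch.2
    have hFform : rest.foldl (fun acc p => max acc p.2) r0 = (rest.map Prod.snd).foldl max r0 := by
      rw [List.foldl_map]
    refine ⟨l0, rest.foldl (fun acc p => max acc p.2) r0, ?_, ?_, ?_, ?_⟩
    · intro p hp'
      constructor
      · rcases List.mem_cons.mp ((hmemA p).mpr hp') with heq | hmem
        · rw [heq]
        · rcases lexle_dest ((List.pairwise_cons.mp hpw).1 p hmem) with h | ⟨h, _⟩ <;>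
            simp at h <;> omega
      · rcases List.mem_cons.mp ((hmemA p).mpr hp') with heq | hmem
        · rw [heq, hFform]; exact (PySem.List.le_foldl_max (rest.map Prod.snd) r0).1
        · rw [hFform]
          exact (PySem.List.le_foldl_max (rest.map Prod.snd) r0).2 p.2
            (List.mem_map.mpr ⟨p, hmem, rfl⟩)
    · exact ⟨(l0, r0), (hmemA _).mp List.mem_cons_self, rfl⟩
    · rw [hFform]
      rcases PySem.List.foldl_max_mem (rest.map Prod.snd) r0 with h | h
      · exact ⟨(l0, r0), (hmemA _).mp List.mem_cons_self, h.symm⟩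
      · obtain ⟨p, hp', hpe⟩ := List.mem_map.mp h
        exact ⟨p, (hmemA p).mp (List.mem_cons_of_mem _ hp'), hpe⟩
    · dsimp only
      rw [merge_run rest 0 l0 r0 hhead hchrest]
      dsimp only
      exact zero_add _

-- once the band endpoints lo/hi index-dominate every candidate and are attained,
-- A's extremal values are exactly the sorted list's values there
lemma pin {s : List Int} (hs : s.Pairwise (· ≤ ·)) {k : Int} {l0 F lo hi : Int}
    (h0lo : 0 ≤ lo) (hhi : hi < PySem.List.len s)
    (hbnd : ∀ p, IsRange s k p → l0 ≤ p.1 ∧ p.2 ≤ F)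
    (hattL : ∃ p, IsRange s k p ∧ p.1 = l0) (hattR : ∃ p, IsRange s k p ∧ p.2 = F)
    (hidx : ∀ p, IsRange s k p → ∃ i j, 0 ≤ j ∧ i < PySem.List.len s ∧
        p.1 = gEl s i ∧ p.2 = gEl s j ∧ lo ≤ i ∧ j ≤ hi)
    (hwlo : ∃ p, IsRange s k p ∧ p.1 = gEl s lo) (hwhi : ∃ p, IsRange s k p ∧ p.2 = gEl s hi) :
    F - l0 + 1 = gEl s hi - gEl s lo + 1 := by
  obtain ⟨pL, hpL, hpLx⟩ := hattL
  obtain ⟨iL, jL, _, hiLlt, hx1, _, hloi, _⟩ := hidx pL hpL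
  have h1 : gEl s lo ≤ l0 := by
    rw [← hpLx, hx1]
    exact mono_g hs h0lo hloi hiLlt
  obtain ⟨pl, hpl, hplx⟩ := hwlo
  have h2 : l0 ≤ gEl s lo := by rw [← hplx]; exact (hbnd pl hpl).1
  obtain ⟨pR, hpR, hpRy⟩ := hattR
  obtain ⟨iR, jR, hjR0, _, _, hy1, _, hjhi⟩ := hidx pR hpR
  have h3 : F ≤ gEl s hi := by
    rw [← hpRy, hy1]
    exact mono_g hs hjR0 hjhi hhi
  obtain ⟨pr, hpr, hpry⟩ := hwhi
  have h4 : gEl s hi ≤ F := by rw [← hpry]; exact (hbnd pr hpr).2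
  omega

lemma main_eq (a : List Int) (k : Int) : count_houses a k = count_houses_alt a k := by
  simp only [count_houses, count_houses_alt]
  have hs : (PySem.List.sorted a (fun x => x) false).Pairwise (· ≤ ·) :=
    PySem.List.sorted_pairwise a (fun x => x)
  set s := PySem.List.sorted a (fun x => x) false with hsdef
  rw [rangesA_spec s k]
  -- abbreviations for B's band boundaries
  set e1 := -(PySem.Int.floordiv (-(PySem.List.len s - k - 1)) 2) with he1
  set e2 := -(PySem.Int.floordiv (-(PySem.List.len s - k)) 2) with he2
  have hb1 : PySem.List.len s - k - 1 ≤ 2 * e1 ∧ 2 * e1 ≤ PySem.List.len s - k := by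
    have := ceil2 (PySem.List.len s - k - 1)
    rw [← he1] at this
    omega
  have hb2 : PySem.List.len s - k ≤ 2 * e2 ∧ 2 * e2 ≤ PySem.List.len s - k + 1 := by
    have := ceil2 (PySem.List.len s - k)
    rw [← he2] at this
    omega
  set d := max 0 e1 with hd
  set c := max 1 e2 with hc
  -- band characterizations of A's two index conditions
  have hPc : ∀ i : Int, (0 ≤ i ∧ i < PySem.List.len s ∧ Pc (PySem.List.len s) k i)
      ↔ (d ≤ i ∧ i ≤ PySem.List.len s - 1 - d) := by
    intro i; unfold Pc; constructor <;> intro h <;> omega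
  have hQc : ∀ i : Int, (0 ≤ i ∧ i < PySem.List.len s - 1 ∧ Qc (PySem.List.len s) k i)
      ↔ (c - 1 ≤ i ∧ i ≤ PySem.List.len s - 1 - c) := by
    intro i; unfold Qc; constructor <;> intro h <;> omega
  -- every candidate's endpoints come with their band membership
  have hxy2 : ∀ p, IsRange s k p → ∃ i j, 0 ≤ i ∧ 0 ≤ j ∧ i < PySem.List.len s ∧
      j < PySem.List.len s ∧ p.1 = gEl s i ∧ p.2 = gEl s j ∧
      ((2 * d ≤ PySem.List.len s - 1 ∧ d ≤ i ∧ j ≤ PySem.List.len s - 1 - d) ∨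
       (2 * c ≤ PySem.List.len s ∧ c - 1 ≤ i ∧ j ≤ PySem.List.len s - c)) := by
    intro p h
    rcases h with ⟨i, h0, h1, h2, rfl⟩ | ⟨i, h0, h1, h2, rfl⟩
    · have := (hPc i).mp ⟨h0, h1, h2⟩
      exact ⟨i, i, h0, h0, h1, h1, rfl, rfl, Or.inl ⟨by omega, by omega, by omega⟩⟩
    · have := (hQc i).mp ⟨h0, h1, h2⟩
      exact ⟨i, i + 1, h0, by omega, by omega, by omega, rfl, rfl,
        Or.inr ⟨by omega, by omega, by omega⟩⟩
  -- concrete candidates at the band endpoints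
  have hwP1 : 2 * d ≤ PySem.List.len s - 1 → IsRange s k (gEl s d, gEl s d) := by
    intro h
    have h2 := (hPc d).mpr ⟨le_refl d, by omega⟩
    exact Or.inl ⟨d, h2.1, h2.2.1, h2.2.2, rfl⟩
  have hwP2 : 2 * d ≤ PySem.List.len s - 1 →
      IsRange s k (gEl s (PySem.List.len s - 1 - d), gEl s (PySem.List.len s - 1 - d)) := by
    intro h
    have h2 := (hPc (PySem.List.len s - 1 - d)).mpr ⟨by omega, le_refl _⟩
    exact Or.inl ⟨PySem.List.len s - 1 - d, h2.1, h2.2.1, h2.2.2, rfl⟩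
  have hwQ1 : 2 * c ≤ PySem.List.len s → IsRange s k (gEl s (c - 1), gEl s c) := by
    intro h
    have h2 := (hQc (c - 1)).mpr ⟨le_refl _, by omega⟩
    refine Or.inr ⟨c - 1, h2.1, h2.2.1, h2.2.2, ?_⟩
    have he : c - 1 + 1 = c := by ring
    rw [he]
  have hwQ2 : 2 * c ≤ PySem.List.len s →
      IsRange s k (gEl s (PySem.List.len s - 1 - c), gEl s (PySem.List.len s - c)) := by
    intro h
    have h2 := (hQc (PySem.List.len s - 1 - c)).mpr ⟨by omega, le_refl _⟩
    refine Or.inr ⟨PySem.List.len s - 1 - c, h2.1, h2.2.1, h2.2.2, ?_⟩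
    have he : PySem.List.len s - 1 - c + 1 = PySem.List.len s - c := by ring
    rw [he]
  have hd0 : 0 ≤ d := by omega
  have hc1 : 1 ≤ c := by omega
  by_cases hp : 2 * d ≤ PySem.List.len s - 1
  · -- point band nonempty
    have hRne : RngList s k ≠ [] := by
      intro hnil
      have := (mem_RngList_iff s k _).mpr (hwP1 hp)
      rw [hnil] at this
      exact absurd this List.not_mem_nil
    obtain ⟨l0, F, hbnd, hattL, hattR, hAval⟩ := A_core s k hs hRne
    rw [if_neg hRne, hAval, if_pos hp]
    by_cases hq : 2 * c ≤ PySem.List.len s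
    · rw [if_pos hq]
      dsimp only
      exact pin hs (by omega) (by omega) hbnd hattL hattR
        (by
          intro p h
          obtain ⟨i, j, _, hj0, hilt, _, hx1, hy1, hca⟩ := hxy2 p h
          exact ⟨i, j, hj0, hilt, hx1, hy1, by omega, by omega⟩)
        (by
          rcases min_cases d (c - 1) with ⟨hm, _⟩ | ⟨hm, _⟩
          · exact ⟨_, hwP1 hp, by rw [hm]⟩
          · exact ⟨_, hwQ1 hq, by rw [hm]⟩)
        (by
          rcases max_cases (PySem.List.len s - 1 - d) (PySem.List.len s - c) with ⟨hm, _⟩ | ⟨hm, _⟩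
          · exact ⟨_, hwP2 hp, by rw [hm]⟩
          · exact ⟨_, hwQ2 hq, by rw [hm]⟩)
    · rw [if_neg hq]
      dsimp only
      exact pin hs hd0 (by omega) hbnd hattL hattR
        (by
          intro p h
          obtain ⟨i, j, _, hj0, hilt, _, hx1, hy1, hca⟩ := hxy2 p h
          rcases hca with hca | hca
          · exact ⟨i, j, hj0, hilt, hx1, hy1, by omega, by omega⟩
          · exact absurd hca.1 hq)
        ⟨_, hwP1 hp, rfl⟩ ⟨_, hwP2 hp, rfl⟩
  · by_cases hq : 2 * c ≤ PySem.List.len s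
    · -- only the interval band is nonempty
      have hRne : RngList s k ≠ [] := by
        intro hnil
        have := (mem_RngList_iff s k _).mpr (hwQ1 hq)
        rw [hnil] at this
        exact absurd this List.not_mem_nil
      obtain ⟨l0, F, hbnd, hattL, hattR, hAval⟩ := A_core s k hs hRne
      rw [if_neg hRne, hAval, if_neg hp, if_pos hq]
      dsimp only
      exact pin hs (by omega) (by omega) hbnd hattL hattR
        (by
          intro p h
          obtain ⟨i, j, _, hj0, hilt, _, hx1, hy1, hca⟩ := hxy2 p h
          rcases hca with hca | hca
          · exact absurd hca.1 hp
          · exact ⟨i, j, hj0, hilt, hx1, hy1, by omega, by omega⟩)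
        ⟨_, hwQ1 hq, rfl⟩ ⟨_, hwQ2 hq, rfl⟩
    · -- no valid range at all: both return 0
      have hRnil : RngList s k = [] := by
        rw [List.eq_nil_iff_forall_not_mem]
        intro p hmem
        rcases hxy2 p ((mem_RngList_iff s k p).mp hmem) with ⟨i, j, _, _, _, _, _, _, hca | hca⟩
        · exact hp hca.1
        · exact hq hca.1
      rw [if_pos hRnil, if_neg hp, if_neg hq]

-- ===== VERDICT (by name: the statement is the Claim_ definition above) =====
theorem count_houses_spec : Claim_equal_count_houses := by
  intro a k _
  show count_houses a k = count_houses_alt a k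
  exact main_eq a k
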